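-- pv_equiv track=rewrite | github.com/sandyjswl/introduction-to-scripting-in-python-coursera | Course 2/Project/solution.py | singleline_diff_format
-- ===== SOURCE A (Python) =====
-- def singleline_diff_format(line1, line2, idx):
--     """
--     Inputs:
--       line1 - first single line string
--       line2 - second single line string
--       idx   - index at which to indicate difference
--     Output:
--       Returns a three line formatted string showing the location
--       of the first difference between line1 and line2.
--
--       If either input line contains a newline or carriage return,
--       then returns an empty string.
--
--       If idx is not a valid index, then returns an empty string.
--     """
--     if '\n' in line1 or '\n' in line2 or '\r' in line1 or '\r' in line2:
--         return ""
--     # if idx != singleline_diff(line1,line2):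
--     #   return ""
--     if len(line1)>len(line2):
--         shorter_line = line2
--         longer_line = line1
--     else:
--         shorter_line = line1
--         longer_line = line2
--     if idx<0 or idx>len(shorter_line):
--         return ""
--     res = ""
--     for index in range(len(longer_line)+1):
--         if index < idx:
--             res=res+"="
--         if index ==idx:
--             res=res+"^"
--
--
--
--     return line1+"\n"+res+"\n"+line2+"\n"
-- ===== SOURCE B (Python) =====
-- def singleline_diff_format(line1, line2, idx):
--     """Closed-form rewrite: build the marker line directly instead of a
--     per-character accumulation loop."""
--     if '\n' in line1 or '\n' in line2 or '\r' in line1 or '\r' in line2: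
--         return ""
--     if idx < 0 or idx > min(len(line1), len(line2)):
--         return ""
--     return line1 + "\n" + "=" * idx + "^" + "\n" + line2 + "\n"
-- ===== Notes on version B (the rewrite author's own statement) =====
-- stated objective: simpler
-- what changed: Replaces the character-by-character marker-building loop over the longer line (and the shorter/longer branch) with a closed-form '"=" * idx + "^"' guarded by min(len(line1), len(line2)). (no per-character loop: marker built in one string-multiply)
import Mathlib
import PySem

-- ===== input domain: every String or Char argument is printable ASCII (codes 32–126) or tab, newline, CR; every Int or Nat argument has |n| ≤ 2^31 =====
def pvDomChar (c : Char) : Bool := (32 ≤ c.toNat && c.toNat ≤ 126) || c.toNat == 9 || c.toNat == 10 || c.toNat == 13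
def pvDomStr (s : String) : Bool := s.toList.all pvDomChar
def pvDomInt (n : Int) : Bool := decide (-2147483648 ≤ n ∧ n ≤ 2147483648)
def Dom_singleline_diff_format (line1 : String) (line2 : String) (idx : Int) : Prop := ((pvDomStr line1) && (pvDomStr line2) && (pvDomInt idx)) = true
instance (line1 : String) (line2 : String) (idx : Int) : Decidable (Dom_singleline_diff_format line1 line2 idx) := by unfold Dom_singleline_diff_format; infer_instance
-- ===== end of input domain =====

-- B replaces A's per-character marker-building loop by the closed form "="*idx ++ "^" (simpler; same values everywhere).

-- ===== PORT A =====
def singleline_diff_format (line1 : String) (line2 : String) (idx : Int) : String :=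
  if PySem.Str.isIn "\n" line1 || PySem.Str.isIn "\n" line2
      || PySem.Str.isIn "\r" line1 || PySem.Str.isIn "\r" line2 then ""
  else
    -- shorter_line / longer_line assignment
    let p := if PySem.Str.len line1 > PySem.Str.len line2 then (line2, line1) else (line1, line2)
    let shorter_line := p.1
    let longer_line := p.2
    if idx < 0 || idx > PySem.Str.len shorter_line then ""
    else
      -- res = ""; for index in range(len(longer_line)+1): …
      let res : List Char :=
        (PySem.List.pyRange 0 (PySem.Str.len longer_line + 1) 1).foldl
          (fun res index =>
            let res := if index < idx then res ++ ['='] else res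
            if index = idx then res ++ ['^'] else res) []
      String.ofList (line1.toList ++ '\n' :: res ++ '\n' :: line2.toList ++ ['\n'])

-- ===== PORT B =====
def singleline_diff_format_alt (line1 : String) (line2 : String) (idx : Int) : String :=
  if PySem.Str.isIn "\n" line1 || PySem.Str.isIn "\n" line2
      || PySem.Str.isIn "\r" line1 || PySem.Str.isIn "\r" line2 then ""
  else if idx < 0 || idx > min (PySem.Str.len line1) (PySem.Str.len line2) then ""
  else
    String.ofList (line1.toList ++ '\n' :: (List.replicate idx.toNat '=' ++ '^' :: '\n' :: line2.toList ++ ['\n']))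

-- ===== PRECONDITION & SPEC =====
def Spec_singleline_diff_format (line1 : String) (line2 : String) (idx : Int) (out : String) : Prop := out = singleline_diff_format_alt line1 line2 idx
instance (line1 : String) (line2 : String) (idx : Int) (out : String) : Decidable (Spec_singleline_diff_format line1 line2 idx out) := by unfold Spec_singleline_diff_format; infer_instance

-- ===== CLAIM (what is proved, stated in full; the proofs are below) =====
def Claim_equal_singleline_diff_format : Prop := ∀ (line1 : String) (line2 : String) (idx : Int), Dom_singleline_diff_format line1 line2 idx → Spec_singleline_diff_format line1 line2 idx (singleline_diff_format line1 line2 idx)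

-- ===== LEMMAS AND PROOFS =====

-- A's loop body, as in the port.
def pvStep (idx : Int) (res : List Char) (index : Int) : List Char :=
  let res := if index < idx then res ++ ['='] else res
  if index = idx then res ++ ['^'] else res

-- over indices strictly below idx, every iteration appends '='
theorem pvLoop_below (idx : Int) : ∀ (k : Nat) (acc : List Char),
    (PySem.List.pyRange (idx - k) idx 1).foldl (pvStep idx) acc = acc ++ List.replicate k '=' := by
  intro k
  induction k with
  | zero => intro acc; simp
  | succ n ih =>
    intro acc
    rw [PySem.List.pyRange_one_cons (by omega)]
    have h1 : idx - (n+1:Nat) + 1 = idx - (n:Nat) := by push_cast; ring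
    have h2 : pvStep idx acc (idx - (n+1:Nat)) = acc ++ ['='] := by
      simp only [pvStep]
      split_ifs with hA hB <;> first | rfl | omega
    simp only [List.foldl_cons]
    push_cast at h1 h2 ⊢
    rw [h2, h1, ih, List.append_assoc, List.singleton_append, ← List.replicate_succ]

-- over indices strictly above idx, the loop is the identity
theorem pvLoop_above (idx : Int) : ∀ (k : Nat) (a : Int), idx < a → ∀ (acc : List Char),
    (PySem.List.pyRange a (a + k) 1).foldl (pvStep idx) acc = acc := by
  intro k
  induction k with
  | zero => intro a _ acc; simp
  | succ n ih =>
    intro a ha acc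
    rw [PySem.List.pyRange_one_cons (by omega)]
    have h2 : pvStep idx acc a = acc := by
      simp [pvStep, if_neg (by omega : ¬ a < idx), if_neg (by omega : ¬ a = idx)]
    have h3 : a + ((n:Int)+1) = (a+1) + n := by ring
    simp only [List.foldl_cons]
    push_cast
    rw [h2, h3, ih (a+1) (by omega)]

-- the whole loop, for 0 ≤ idx ≤ n, produces "="*idx ++ "^"
theorem pvLoop_closed (idx n : Int) (h0 : 0 ≤ idx) (hn : idx ≤ n) :
    (PySem.List.pyRange 0 (n + 1) 1).foldl (pvStep idx) [] =
      List.replicate idx.toNat '=' ++ ['^'] := by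
  rw [PySem.List.pyRange_one_append 0 idx (n+1) h0 (by omega),
      PySem.List.pyRange_one_append idx (idx+1) (n+1) (by omega) (by omega),
      List.foldl_append, List.foldl_append]
  have hfront : PySem.List.pyRange 0 idx 1 = PySem.List.pyRange (idx - idx.toNat) idx 1 := by
    congr 1; omega
  rw [hfront, pvLoop_below idx idx.toNat [], PySem.List.pyRange_one_singleton]
  have hmid : pvStep idx (List.replicate idx.toNat '=') idx =
      List.replicate idx.toNat '=' ++ ['^'] := by
    simp [pvStep]
  simp only [List.foldl_cons, List.foldl_nil, List.nil_append, hmid]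
  have : n + 1 = (idx + 1) + (n - idx).toNat := by omega
  rw [this, pvLoop_above idx (n - idx).toNat (idx+1) (by omega)]

-- ===== VERDICT (by name: the statement is the Claim_ definition above) =====
theorem singleline_diff_format_spec : Claim_equal_singleline_diff_format := by
  intro line1 line2 idx _
  unfold Spec_singleline_diff_format singleline_diff_format singleline_diff_format_alt
  split
  · rfl
  · simp only []
    by_cases h : PySem.Str.len line1 > PySem.Str.len line2
    · rw [if_pos h]
      have hs : min (PySem.Str.len line1) (PySem.Str.len line2) = PySem.Str.len line2 := by omega
      rw [hs]
      split
      · rfl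
      · rename_i hg
        simp only [Bool.or_eq_true, decide_eq_true_eq, not_or] at hg
        have := pvLoop_closed idx (PySem.Str.len line1) (by omega) (by simp [PySem.Str.len_eq] at *; omega)
        rw [show (fun (res : List Char) (index : Int) =>
              let res := if index < idx then res ++ ['='] else res
              if index = idx then res ++ ['^'] else res) = pvStep idx from rfl, this]
        simp
    · rw [if_neg h]
      have hs : min (PySem.Str.len line1) (PySem.Str.len line2) = PySem.Str.len line1 := by omega
      rw [hs]
      split
      · rfl
      · rename_i hg
        simp only [Bool.or_eq_true, decide_eq_true_eq, not_or] at hg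
        have := pvLoop_closed idx (PySem.Str.len line2) (by omega) (by simp [PySem.Str.len_eq] at *; omega)
        rw [show (fun (res : List Char) (index : Int) =>
              let res := if index < idx then res ++ ['='] else res
              if index = idx then res ++ ['^'] else res) = pvStep idx from rfl, this]
        simp
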